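-- pv_equiv track=rewrite | github.com/testingautomated-usi/corrupted-text | foo/text_corruptor.py | bad_autocompletes
-- ===== SOURCE A (Python) =====
-- from typing import List, Optional, Dict
--
-- MIN_COMMON_START_FOR_AUTOCOMPLETE = 2
--
-- def bad_autocompletes(word: str,
--                       start_bags: Dict[int, Dict[str, List[str]]],
--                       common_letters: int) -> Optional[List[str]]:
--     """Returns a list of words which start with the same letters as the passed word."""
--     if common_letters < MIN_COMMON_START_FOR_AUTOCOMPLETE:
--         # End of recursion, no common words found.
--         # This will only rarely happen in sufficiently large datasets.
--         return None
--
--     common_letters = min(common_letters, len(word))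
--
--     res = start_bags[common_letters].get(word[:common_letters])
--     if res is None or (len(res) == 1 and res[0] == word):
--         # Gracefully handle case where no words start with the selected number of same letters
--         return bad_autocompletes(word, start_bags, common_letters=common_letters - 1)
--     if word in res:
--         res.remove(word)
--     return res
-- ===== SOURCE B (Python) =====
-- from typing import List, Optional, Dict
--
-- MIN_COMMON_START_FOR_AUTOCOMPLETE = 2
--
-- def bad_autocompletes(word: str,
--                       start_bags: Dict[int, Dict[str, List[str]]],
--                       common_letters: int) -> Optional[List[str]]:
--     """Returns a list of words which start with the same letters as the passed word.
--
--     Iterative: precompute the (clamped) candidate prefix lengths, longest first,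
--     and return the first usable bag entry.  (Like the original, removes `word`
--     from the returned bag list in place.)
--     """
--     if common_letters < MIN_COMMON_START_FOR_AUTOCOMPLETE:
--         return None
--     m = min(common_letters, len(word))
--     # candidate prefix lengths: m, m-1, ..., 2 (just [m] when the clamp pushed m below 2)
--     for k in range(m, min(m, MIN_COMMON_START_FOR_AUTOCOMPLETE) - 1, -1):
--         res = start_bags[k].get(word[:k])
--         if res is not None and not (len(res) == 1 and res[0] == word):
--             if word in res:
--                 res.remove(word)
--             return res
--     return None
-- ===== Notes on version B (the rewrite author's own statement) =====
-- stated objective: idiomatic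
-- what changed: Replaces the tail recursion (guard, re-clamp, decrement, recurse) by precomputing the list of candidate prefix lengths once and scanning it with a single for-loop that returns the first usable bag entry.
import Mathlib
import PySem

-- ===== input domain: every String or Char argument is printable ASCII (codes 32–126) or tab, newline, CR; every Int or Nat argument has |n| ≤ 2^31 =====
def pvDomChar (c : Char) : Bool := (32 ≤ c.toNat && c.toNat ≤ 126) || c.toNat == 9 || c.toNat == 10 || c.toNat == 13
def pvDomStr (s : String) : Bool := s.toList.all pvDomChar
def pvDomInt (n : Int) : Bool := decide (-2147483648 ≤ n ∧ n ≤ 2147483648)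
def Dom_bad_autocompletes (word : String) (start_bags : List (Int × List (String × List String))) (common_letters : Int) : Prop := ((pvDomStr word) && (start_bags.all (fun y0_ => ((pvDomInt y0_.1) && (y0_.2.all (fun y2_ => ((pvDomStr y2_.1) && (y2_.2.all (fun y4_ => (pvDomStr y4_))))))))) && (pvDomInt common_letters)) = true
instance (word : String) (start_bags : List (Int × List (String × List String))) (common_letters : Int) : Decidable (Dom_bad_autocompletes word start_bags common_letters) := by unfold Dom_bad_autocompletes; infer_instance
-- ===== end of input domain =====

-- ===== PORT A =====
-- B rewrites A's tail recursion as a precomputed list of candidate prefix lengths scanned by one loop (idiomatic); return-value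
-- equivalence only as to Lean, but Python B performs the same in-place res.remove(word) mutation as A.
-- Port of A: literal transliteration; the Python's `common_letters = min(common_letters, len(word))` rebinding is inlined
-- (the clamped value is used for the key, the slice and the recursion, exactly as in A).
def bad_autocompletes (word : String) (start_bags : List (Int × List (String × List String))) (common_letters : Int) : Option (List String) :=
  if common_letters < 2 then none
  else
    match (PySem.Dict.mk start_bags).get? (min common_letters (PySem.Str.len word)) with
    | none => none  -- Python raises KeyError here; excluded by Pre_
    | some bag =>
      match (PySem.Dict.mk bag).get? (PySem.Str.slice word none (some (min common_letters (PySem.Str.len word)))) with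
      | none => bad_autocompletes word start_bags (min common_letters (PySem.Str.len word) - 1)
      | some res =>
        if res.length = 1 ∧ PySem.List.pyGet? res 0 = some word then
          bad_autocompletes word start_bags (min common_letters (PySem.Str.len word) - 1)
        else if res.contains word then some (res.erase word)  -- res.remove(word): erase first occurrence
        else some res
termination_by common_letters.toNat
decreasing_by omega

-- ===== PORT B =====
-- the for-loop of Source B over the precomputed list of candidate prefix lengths: first usable entry wins
def altScan (word : String) (start_bags : List (Int × List (String × List String))) : List Int → Option (List String)
  | [] => none
  | k :: ks =>
    match (PySem.Dict.mk start_bags).get? k with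
    | none => none  -- Python raises KeyError here; excluded by Pre_
    | some bag =>
      match (PySem.Dict.mk bag).get? (PySem.Str.slice word none (some k)) with
      | none => altScan word start_bags ks
      | some res =>
        if res.length = 1 ∧ PySem.List.pyGet? res 0 = some word then altScan word start_bags ks
        else if res.contains word then some (res.erase word)
        else some res

def bad_autocompletes_alt (word : String) (start_bags : List (Int × List (String × List String))) (common_letters : Int) : Option (List String) :=
  if common_letters < 2 then none
  else
    altScan word start_bags
      (PySem.List.pyRange (min common_letters (PySem.Str.len word))
        (min (min common_letters (PySem.Str.len word)) 2 - 1) (-1))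

-- ===== PRECONDITION & SPEC =====
-- A candidate key j is "blocked" when start_bags has key j but its bag yields no usable entry for word's length-j prefix
-- (missing prefix, or a singleton list equal to word itself): exactly the case in which A's descent goes past key j.
def pvBlocked (word : String) (start_bags : List (Int × List (String × List String))) (j : Int) : Bool :=
  match (PySem.Dict.mk start_bags).get? j with
  | none => false
  | some bag =>
    match (PySem.Dict.mk bag).get? (PySem.Str.slice word none (some j)) with
    | none => true
    | some res => decide (res.length = 1 ∧ PySem.List.pyGet? res 0 = some word)

-- Pre_ excludes EXACTLY the inputs on which Python A raises KeyError: those where the descent, having found every higher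
-- candidate key present but unusable, reaches a candidate key that is missing from start_bags.  On every input Pre_
-- admits, A returns normally (and so does B, which indexes the same keys in the same order).
def Pre_bad_autocompletes (word : String) (start_bags : List (Int × List (String × List String))) (common_letters : Int) : Prop :=
  common_letters < 2 ∨
    ∀ k ∈ PySem.List.pyRange (min common_letters (PySem.Str.len word))
            (min (min common_letters (PySem.Str.len word)) 2 - 1) (-1),
      (∀ j ∈ PySem.List.pyRange (min common_letters (PySem.Str.len word))
              (min (min common_letters (PySem.Str.len word)) 2 - 1) (-1),
          k < j → pvBlocked word start_bags j = true) →
      ((PySem.Dict.mk start_bags).get? k).isSome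
instance (word : String) (start_bags : List (Int × List (String × List String))) (common_letters : Int) : Decidable (Pre_bad_autocompletes word start_bags common_letters) := by unfold Pre_bad_autocompletes; infer_instance

def pvWitness_bad_autocompletes : String × (List (Int × List (String × List String))) × Int :=
  ("abc", [((2 : Int), [("ab", ["abx", "aby"])]), ((3 : Int), [("abc", ["abc"])])], 3)

def Spec_bad_autocompletes (word : String) (start_bags : List (Int × List (String × List String))) (common_letters : Int) (out : Option (List String)) : Prop := out = bad_autocompletes_alt word start_bags common_letters
instance (word : String) (start_bags : List (Int × List (String × List String))) (common_letters : Int) (out : Option (List String)) : Decidable (Spec_bad_autocompletes word start_bags common_letters out) := by unfold Spec_bad_autocompletes; infer_instance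

-- ===== CLAIM (what is proved, stated in full; the proofs are below) =====
def Claim_equal_bad_autocompletes : Prop := ∀ (word : String) (start_bags : List (Int × List (String × List String))) (common_letters : Int), Dom_bad_autocompletes word start_bags common_letters → Pre_bad_autocompletes word start_bags common_letters → Spec_bad_autocompletes word start_bags common_letters (bad_autocompletes word start_bags common_letters)

-- ===== LEMMAS AND PROOFS =====

-- A at an already-clamped count equals B's scan of the remaining countdown of candidate keys.
lemma aux_scan (word : String) (sb : List (Int × List (String × List String))) :
    ∀ (n : Nat) (c : Int), c.toNat ≤ n → c ≤ PySem.Str.len word →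
      bad_autocompletes word sb c = altScan word sb (PySem.List.pyRange c 1 (-1)) := by
  intro n
  induction n with
  | zero =>
    intro c hc hle
    have h2 : c < 2 := by omega
    rw [bad_autocompletes, if_pos h2, PySem.List.pyRange_neg_one_eq_nil (by omega), altScan]
  | succ n ih =>
    intro c hc hle
    by_cases h2 : c < 2
    · rw [bad_autocompletes, if_pos h2, PySem.List.pyRange_neg_one_eq_nil (by omega), altScan]
    · rw [PySem.List.pyRange_neg_one_cons (by omega : (1:Int) < c)]
      rw [bad_autocompletes, if_neg h2, altScan]
      have hmin : min c (PySem.Str.len word) = c := min_eq_left hle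
      rw [hmin]
      have hrec : bad_autocompletes word sb (c - 1)
          = altScan word sb (PySem.List.pyRange (c - 1) 1 (-1)) := ih (c - 1) (by omega) (by omega)
      cases (PySem.Dict.mk sb).get? c with
      | none => rfl
      | some bag =>
        dsimp only
        cases (PySem.Dict.mk bag).get? (PySem.Str.slice word none (some c)) with
        | none => exact hrec
        | some res =>
          dsimp only
          by_cases htriv : res.length = 1 ∧ PySem.List.pyGet? res 0 = some word
          · rw [if_pos htriv, if_pos htriv, hrec]
          · rw [if_neg htriv, if_neg htriv]

-- ===== VERDICT (by name: the statement is the Claim_ definition above) =====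
theorem bad_autocompletes_spec : Claim_equal_bad_autocompletes := by
  intro word sb cl _hdom _hpre
  unfold Spec_bad_autocompletes bad_autocompletes_alt
  by_cases h2 : cl < 2
  · rw [bad_autocompletes, if_pos h2, if_pos h2]
  · rw [if_neg h2]
    have hlen : (0:Int) ≤ PySem.Str.len word := by
      rw [PySem.Str.len_eq]; exact_mod_cast Nat.zero_le _
    by_cases hm : 2 ≤ min cl (PySem.Str.len word)
    · -- the clamped count m is still ≥ 2: A at cl computes exactly A at m; B scans m, m-1, …, 2
      have hmin2 : min (min cl (PySem.Str.len word)) 2 - 1 = 1 := by omega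
      rw [hmin2]
      have hclamp : bad_autocompletes word sb cl
          = bad_autocompletes word sb (min cl (PySem.Str.len word)) := by
        conv_rhs => rw [bad_autocompletes]
        rw [bad_autocompletes, if_neg h2, if_neg (by omega), min_assoc, min_self]
      rw [hclamp]
      exact aux_scan word sb (min cl (PySem.Str.len word)).toNat _ le_rfl (by omega)
    · -- the clamp pushed m below 2 (len word < 2): one lookup at key m, then both sides give none
      have hmL : min cl (PySem.Str.len word) = PySem.Str.len word := by omega
      rw [hmL]
      have hsingle : PySem.List.pyRange (PySem.Str.len word)
          (min (PySem.Str.len word) 2 - 1) (-1) = [PySem.Str.len word] := by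
        rw [PySem.List.pyRange_neg_one_cons (by omega), PySem.List.pyRange_neg_one_eq_nil (by omega)]
      rw [hsingle]
      rw [bad_autocompletes, if_neg h2, hmL, altScan]
      have hrec : bad_autocompletes word sb (PySem.Str.len word - 1) = altScan word sb [] := by
        rw [bad_autocompletes, if_pos (by omega), altScan]
      cases (PySem.Dict.mk sb).get? (PySem.Str.len word) with
      | none => rfl
      | some bag =>
        dsimp only
        cases (PySem.Dict.mk bag).get? (PySem.Str.slice word none (some (PySem.Str.len word))) with
        | none => exact hrec
        | some res =>
          dsimp only
          by_cases htriv : res.length = 1 ∧ PySem.List.pyGet? res 0 = some word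
          · rw [if_pos htriv, if_pos htriv, hrec]
          · rw [if_neg htriv, if_neg htriv]
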